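-- pv_equiv track=rewrite | github.com/Studio-76/ForgeFrame | backend/app/storage/migrator.py | _split_top_level_csv
-- ===== SOURCE A (Python) =====
-- def _split_top_level_csv(expression: str) -> list[str]:
--     chunks: list[str] = []
--     current: list[str] = []
--     depth = 0
--     for char in expression:
--         if char == "(":
--             depth += 1
--         elif char == ")" and depth > 0:
--             depth -= 1
--         if char == "," and depth == 0:
--             chunk = "".join(current).strip()
--             if chunk:
--                 chunks.append(chunk)
--             current = []
--             continue
--         current.append(char)
--     tail = "".join(current).strip()
--     if tail:
--         chunks.append(tail)
--     return chunks
-- ===== SOURCE B (Python) =====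
-- def _split_top_level_csv(expression: str) -> list[str]:
--     boundaries = []
--     depth = 0
--     for i, char in enumerate(expression):
--         if char == "(":
--             depth += 1
--         elif char == ")" and depth > 0:
--             depth -= 1
--         elif char == "," and depth == 0:
--             boundaries.append(i)
--     parts = []
--     prev = 0
--     for b in boundaries + [len(expression)]:
--         piece = expression[prev:b].strip()
--         if piece:
--             parts.append(piece)
--         prev = b + 1
--     return parts
-- ===== Notes on version B (the rewrite author's own statement) =====
-- stated objective: alternative
-- what changed: Replaces A's character-buffer accumulation (joining a growing list of chars at each top-level comma) with a boundary-index pass that records top-level comma positions and a second pass that slices the original string between consecutive boundaries.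
import Mathlib
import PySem

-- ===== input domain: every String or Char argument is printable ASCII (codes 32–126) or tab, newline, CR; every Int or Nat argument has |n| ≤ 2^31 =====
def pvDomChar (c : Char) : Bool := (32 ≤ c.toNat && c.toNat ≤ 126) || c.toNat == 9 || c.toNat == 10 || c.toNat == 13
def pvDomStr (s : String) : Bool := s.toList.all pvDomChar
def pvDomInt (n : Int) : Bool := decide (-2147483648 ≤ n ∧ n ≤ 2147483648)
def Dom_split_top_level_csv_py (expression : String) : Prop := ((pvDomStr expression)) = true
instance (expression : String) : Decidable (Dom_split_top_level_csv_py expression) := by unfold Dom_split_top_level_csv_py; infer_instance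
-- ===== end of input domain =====

-- B replaces A's character-buffer accumulation with a boundary-index pass plus slicing of the original string; an alternative decomposition at the same cost.

-- ===== PORT A =====
-- the if/elif depth update both Pythons perform on each character
def pvDepthUpd (d : Int) (c : Char) : Int :=
  if c = '(' then d + 1 else if c = ')' ∧ d > 0 then d - 1 else d

-- one step of A's 'for char in expression' loop; state = (chunks, current, depth)
def pvAStep (st : List String × List Char × Int) (c : Char) : List String × List Char × Int :=
  let depth := pvDepthUpd st.2.2 c
  if c = ',' ∧ depth = 0 then
    let chunk := PySem.Chars.strip st.2.1
    (if chunk ≠ [] then st.1 ++ [String.ofList chunk] else st.1, [], depth)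
  else
    (st.1, st.2.1 ++ [c], depth)

def split_top_level_csv_py (expression : String) : List String :=
  let st := expression.toList.foldl pvAStep ([], [], 0)
  let tail := PySem.Chars.strip st.2.1
  if tail ≠ [] then st.1 ++ [String.ofList tail] else st.1

-- ===== PORT B =====
-- B's first pass: indices of top-level commas (i = index in the whole string of the head of cs)
def pvBBounds : List Char → Nat → Int → List Nat
  | [], _, _ => []
  | c :: cs, i, depth =>
    if c = '(' then pvBBounds cs (i + 1) (depth + 1)
    else if c = ')' ∧ depth > 0 then pvBBounds cs (i + 1) (depth - 1)
    else if c = ',' ∧ depth = 0 then i :: pvBBounds cs (i + 1) depth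
    else pvBBounds cs (i + 1) depth

-- B's second pass: slice the original between consecutive boundaries; state = (parts, prev)
def pvBStep (cs : List Char) (st : List String × Nat) (b : Nat) : List String × Nat :=
  let piece := PySem.Chars.strip (PySem.List.slice cs (some (st.2 : Int)) (some (b : Int)))
  (if piece ≠ [] then st.1 ++ [String.ofList piece] else st.1, b + 1)

def split_top_level_csv_py_alt (expression : String) : List String :=
  let cs := expression.toList
  let boundaries := pvBBounds cs 0 0
  ((boundaries ++ [cs.length]).foldl (pvBStep cs) ([], 0)).1

-- ===== PRECONDITION & SPEC =====
def Spec_split_top_level_csv_py (expression : String) (out : List String) : Prop := out = split_top_level_csv_py_alt expression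
instance (expression : String) (out : List String) : Decidable (Spec_split_top_level_csv_py expression out) := by unfold Spec_split_top_level_csv_py; infer_instance

-- ===== CLAIM (what is proved, stated in full; the proofs are below) =====
def Claim_equal_split_top_level_csv_py : Prop := ∀ (expression : String), Dom_split_top_level_csv_py expression → Spec_split_top_level_csv_py expression (split_top_level_csv_py expression)

-- ===== LEMMAS AND PROOFS =====

-- canonical decomposition of the string into segments between top-level commas
def pvSegs : List Char → Int → List (List Char)
  | [], _ => [[]]
  | c :: cs, depth =>
    let depth' := pvDepthUpd depth c
    if c = ',' ∧ depth' = 0 then [] :: pvSegs cs depth'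
    else
      match pvSegs cs depth' with
      | [] => [[c]]
      | s :: rest => (c :: s) :: rest

def pvCollect (ss : List (List Char)) : List String :=
  ss.foldr (fun s acc => let t := PySem.Chars.strip s; if t ≠ [] then String.ofList t :: acc else acc) []

def pvMergeHead (cur : List Char) : List (List Char) → List (List Char)
  | [] => []
  | s :: rest => (cur ++ s) :: rest

lemma pvSegs_ne_nil (cs : List Char) (d : Int) : pvSegs cs d ≠ [] := by
  cases cs with
  | nil => simp [pvSegs]
  | cons c cs =>
      simp only [pvSegs]
      repeat' split
      all_goals simp

lemma pvMergeHead_nil (ss : List (List Char)) : pvMergeHead [] ss = ss := by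
  cases ss <;> simp [pvMergeHead]

lemma pvCollect_cons (s : List Char) (ss : List (List Char)) :
    pvCollect (s :: ss)
      = (if PySem.Chars.strip s ≠ [] then [String.ofList (PySem.Chars.strip s)] else []) ++ pvCollect ss := by
  simp only [pvCollect, List.foldr_cons]
  split <;> simp_all

-- A's loop + tail handling computes the canonical segments, with `cur` prefixed to the first one
lemma pvA_foldl (cs : List Char) : ∀ (chunks : List String) (cur : List Char) (d : Int),
    (let st := cs.foldl pvAStep (chunks, cur, d);
     if PySem.Chars.strip st.2.1 ≠ [] then st.1 ++ [String.ofList (PySem.Chars.strip st.2.1)] else st.1)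
    = chunks ++ pvCollect (pvMergeHead cur (pvSegs cs d)) := by
  induction cs with
  | nil =>
      intro chunks cur d
      simp only [List.foldl_nil, pvSegs, pvMergeHead, List.append_nil, pvCollect]
      split <;> simp_all
  | cons c cs ih =>
      intro chunks cur d
      simp only [List.foldl_cons]
      by_cases hcomma : c = ',' ∧ pvDepthUpd d c = 0
      · rw [show pvAStep (chunks, cur, d) c =
          ((if PySem.Chars.strip cur ≠ [] then chunks ++ [String.ofList (PySem.Chars.strip cur)] else chunks),
            [], pvDepthUpd d c) from by
            simp only [pvAStep]; rw [if_pos hcomma]]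
        rw [ih]
        simp only [pvSegs]
        rw [if_pos hcomma, pvMergeHead_nil]
        simp only [pvMergeHead, List.append_nil, pvCollect_cons]
        split <;> simp_all
      · rw [show pvAStep (chunks, cur, d) c = (chunks, cur ++ [c], pvDepthUpd d c) from by
            simp only [pvAStep]; rw [if_neg hcomma]]
        rw [ih]
        simp only [pvSegs]
        rw [if_neg hcomma]
        obtain ⟨s, rest, hs⟩ := List.exists_cons_of_ne_nil (pvSegs_ne_nil cs (pvDepthUpd d c))
        rw [hs]
        simp [pvMergeHead]

-- B's slicing pass over the boundary indices computes the same canonical segments;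
-- acc is the already-scanned part of the current segment (= pre.drop prev)
lemma pvB_foldl (cs : List Char) : ∀ (pre : List Char) (prev : Nat) (d : Int)
    (acc : List Char) (parts : List String),
    prev ≤ pre.length → pre.drop prev = acc →
    ((pvBBounds cs pre.length d ++ [(pre ++ cs).length]).foldl (pvBStep (pre ++ cs)) (parts, prev)).1
    = parts ++ pvCollect (pvMergeHead acc (pvSegs cs d)) := by
  induction cs with
  | nil =>
      intro pre prev d acc parts hprev hacc
      have hlen : acc.length = pre.length - prev := by rw [← hacc]; simp
      simp only [pvBBounds, List.nil_append, List.append_nil, List.foldl_cons, List.foldl_nil, pvBStep]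
      rw [PySem.List.slice_natCast, hacc]
      rw [List.take_of_length_le (by omega)]
      simp only [pvSegs, pvMergeHead, List.append_nil, pvCollect]
      split <;> simp_all
  | cons c cs ih =>
      intro pre prev d acc parts hprev hacc
      have hlen : acc.length = pre.length - prev := by rw [← hacc]; simp
      have hpre' : prev ≤ (pre ++ [c]).length := by simp; omega
      have hacc' : (pre ++ [c]).drop prev = acc ++ [c] := by
        rw [List.drop_append_of_le_length hprev, hacc]
      have hassoc : (pre ++ [c]) ++ cs = pre ++ c :: cs := by simp
      have hlen1 : (pre ++ [c]).length = pre.length + 1 := by simp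
      by_cases hcomma : c = ',' ∧ d = 0
      · -- a top-level comma: boundary pre.length is emitted
        have hnotpar : ¬ c = '(' := by simp [hcomma.1]
        have hnotclose : ¬ (c = ')' ∧ d > 0) := by rintro ⟨h1, _⟩; rw [hcomma.1] at h1; simp at h1
        rw [show pvBBounds (c :: cs) pre.length d = pre.length :: pvBBounds cs (pre.length + 1) d from by
          simp only [pvBBounds]; rw [if_neg hnotpar, if_neg hnotclose, if_pos hcomma]]
        simp only [List.cons_append, List.foldl_cons, pvBStep]
        rw [PySem.List.slice_natCast]
        rw [show (pre ++ c :: cs).drop prev = acc ++ c :: cs from by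
          rw [List.drop_append_of_le_length hprev, hacc]]
        rw [show pre.length - prev = acc.length from hlen.symm]
        rw [List.take_left' rfl]
        have hIH := ih (pre ++ [c]) (pre.length + 1) d []
          (if PySem.Chars.strip acc ≠ [] then parts ++ [String.ofList (PySem.Chars.strip acc)] else parts)
          (by simp) (by simp)
        rw [hlen1, hassoc] at hIH
        rw [hIH]
        have hdu : pvDepthUpd d c = d := by
          simp only [pvDepthUpd]; rw [if_neg hnotpar, if_neg hnotclose]
        simp only [pvSegs, hdu]
        rw [if_pos hcomma, pvMergeHead_nil]
        simp only [pvMergeHead, pvCollect_cons]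
        split <;> simp_all
      · -- not a top-level comma: no boundary here, depth becomes pvDepthUpd d c
        have hb : pvBBounds (c :: cs) pre.length d = pvBBounds cs (pre.length + 1) (pvDepthUpd d c) := by
          simp only [pvBBounds, pvDepthUpd]
          by_cases h1 : c = '('
          · rw [if_pos h1, if_pos h1]
          · rw [if_neg h1, if_neg h1]
            by_cases h2 : c = ')' ∧ d > 0
            · rw [if_pos h2, if_pos h2]
            · rw [if_neg h2, if_neg h2, if_neg hcomma]
        rw [hb]
        have hIH := ih (pre ++ [c]) prev (pvDepthUpd d c) (acc ++ [c]) parts hpre' hacc'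
        rw [hlen1, hassoc] at hIH
        rw [hIH]
        have hcomma' : ¬ (c = ',' ∧ pvDepthUpd d c = 0) := by
          rintro ⟨h1, h2⟩
          have : pvDepthUpd d c = d := by
            simp only [pvDepthUpd]
            rw [if_neg (by simp [h1]), if_neg (by rintro ⟨hc, _⟩; rw [h1] at hc; simp at hc)]
          exact hcomma ⟨h1, by omega⟩
        simp only [pvSegs]
        rw [if_neg hcomma']
        obtain ⟨s, rest, hs⟩ := List.exists_cons_of_ne_nil (pvSegs_ne_nil cs (pvDepthUpd d c))
        rw [hs]
        simp [pvMergeHead]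

-- ===== VERDICT (by name: the statement is the Claim_ definition above) =====
theorem split_top_level_csv_py_spec : Claim_equal_split_top_level_csv_py := by
  intro e _
  unfold Spec_split_top_level_csv_py split_top_level_csv_py split_top_level_csv_py_alt
  have hA := pvA_foldl e.toList [] [] 0
  have hB := pvB_foldl e.toList [] 0 0 [] [] (by simp) (by simp)
  simp only [List.nil_append, List.length_nil] at hA hB
  simp only []
  rw [hA, hB]
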